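-- pv_equiv track=rewrite | github.com/KarolinaPSouza/dataset-pesquisa | 1674-Subordinates/11701594.py | subordinates
-- ===== SOURCE A (Python) =====
-- def subordinates(D, D2, i):
--     if i in D2:
--         return D2[i]
--     if len(D[i]) == 0:
--         D2[i] = 0
--         return 0
--     total = 0
--     for j in D[i]:
--         total += 1 + subordinates(D, D2, j)
--     D2[i] = total
--     return total
-- ===== SOURCE B (Python) =====
-- def subordinates(D, D2, i):
--     # Iterative explicit-stack post-order traversal instead of recursion.
--     # Return-value equivalence only: A memoizes into the shared D2 dict,
--     # B keeps its own local memo (a copy of D2) and leaves D2 untouched.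
--     memo = dict(D2)
--     stack = [(i, 0, 0)]  # (node, next child index, running total)
--     result = 0
--     while stack:
--         n, k, t = stack.pop()
--         if k == 0 and n in memo:
--             v = memo[n]
--         else:
--             cs = D[n]
--             if k < len(cs):
--                 stack.append((n, k + 1, t))
--                 stack.append((cs[k], 0, 0))
--                 continue
--             memo[n] = t
--             v = t
--         if stack:
--             pn, pk, pt = stack.pop()
--             stack.append((pn, pk, pt + 1 + v))
--         else:
--             result = v
--     return result
-- ===== Notes on version B (the rewrite author's own statement) =====
-- stated objective: alternative
-- what changed: The recursive memoized DFS is replaced by an iterative post-order traversal driven by an explicit stack of (node, child-index, running-total) frames with a local memo, removing recursion entirely; equivalence is about the return value (A also mutates D2, B does not).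
import Mathlib
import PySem

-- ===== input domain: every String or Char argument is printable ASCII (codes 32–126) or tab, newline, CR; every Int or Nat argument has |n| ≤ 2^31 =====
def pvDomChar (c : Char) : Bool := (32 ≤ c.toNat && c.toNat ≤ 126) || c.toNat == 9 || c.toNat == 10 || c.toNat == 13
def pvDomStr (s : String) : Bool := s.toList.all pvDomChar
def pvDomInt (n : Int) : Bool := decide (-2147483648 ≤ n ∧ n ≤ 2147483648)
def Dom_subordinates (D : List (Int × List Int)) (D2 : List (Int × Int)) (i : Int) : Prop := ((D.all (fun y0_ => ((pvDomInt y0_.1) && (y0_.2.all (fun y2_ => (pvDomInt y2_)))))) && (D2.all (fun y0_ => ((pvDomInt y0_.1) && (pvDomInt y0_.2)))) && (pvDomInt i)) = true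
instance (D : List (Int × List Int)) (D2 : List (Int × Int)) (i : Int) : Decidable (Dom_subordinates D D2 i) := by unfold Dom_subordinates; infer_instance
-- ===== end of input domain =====

-- B replaces A's recursive memoized DFS by an iterative explicit-stack post-order traversal
-- (return-value equivalence only: A memoizes into the shared dict D2, B uses a local copy).

-- ===== PORT A =====
-- A's recursion is ported with a fuel parameter (totality device only; the fuel is
-- large enough that it never runs out on inputs admitted by Pre_subordinates).
mutual
def pvARun (dD : PySem.Dict Int (List Int)) : Nat → PySem.Dict Int Int → Int → Option (Int × PySem.Dict Int Int)
  | 0, _, _ => none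
  | f+1, d2, i =>
    if d2.contains i then some (d2.getD i 0, d2)
    else
      match dD.get? i with
      | none => none               -- Python: KeyError
      | some cs =>
        if cs.length = 0 then some (0, d2.insert i 0)
        else
          match pvALoop dD f cs 0 d2 with
          | none => none
          | some (t, d2') => some (t, d2'.insert i t)
  termination_by f d2 i => (f, 0)
def pvALoop (dD : PySem.Dict Int (List Int)) : Nat → List Int → Int → PySem.Dict Int Int → Option (Int × PySem.Dict Int Int)
  | _, [], t, d2 => some (t, d2)
  | f, j :: rest, t, d2 =>
    match pvARun dD f d2 j with
    | none => none
    | some (v, d2') => pvALoop dD f rest (t + 1 + v) d2'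
  termination_by f cs t d2 => (f, cs.length + 1)
end

/-- total number of child entries of `D` (after dict construction); bounds every quantity below. -/
def pvLB (D : List (Int × List Int)) : Nat :=
  (((PySem.Dict.ofList D).items).flatMap (fun p => p.2)).length

def pvFuelA (D : List (Int × List Int)) : Nat := pvLB D + 2

def subordinates (D : List (Int × List Int)) (D2 : List (Int × Int)) (i : Int) : Int :=
  match pvARun (PySem.Dict.ofList D) (pvFuelA D) (PySem.Dict.ofList D2) i with
  | some (v, _) => v
  | none => 0

-- ===== PORT B =====
/-- deliver a finished value `v` to the frame below (Python: the `if stack:` tail of the loop body). -/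
def pvDeliver (v : Int) (S : List (Int × Int × Int)) (memo : PySem.Dict Int Int) (res : Int) :
    (List (Int × Int × Int)) × PySem.Dict Int Int × Int :=
  match S with
  | [] => ([], memo, v)
  | (pn, pk, pt) :: r => ((pn, pk, pt + 1 + v) :: r, memo, res)

/-- one `while stack:` loop, with fuel as totality device (head of the list = top of the stack). -/
def pvMRun (dD : PySem.Dict Int (List Int)) :
    Nat → (List (Int × Int × Int)) × PySem.Dict Int Int × Int → Option Int
  | 0, _ => none
  | _+1, ([], _, res) => some res
  | g+1, ((n, k, t) :: S, memo, res) =>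
    if k = 0 ∧ memo.contains n = true then
      pvMRun dD g (pvDeliver (memo.getD n 0) S memo res)
    else
      match dD.get? n with
      | none => none               -- Python: KeyError
      | some cs =>
        if k < (cs.length : Int) then
          match PySem.List.pyGet? cs k with
          | none => none
          | some c => pvMRun dD g ((c, 0, 0) :: (n, k + 1, t) :: S, memo, res)
        else
          pvMRun dD g (pvDeliver t S (memo.insert n t) res)

def pvFuelB (D : List (Int × List Int)) : Nat := pvFuelA D ^ pvFuelA D + 1

def subordinates_alt (D : List (Int × List Int)) (D2 : List (Int × Int)) (i : Int) : Int :=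
  match pvMRun (PySem.Dict.ofList D) (pvFuelB D)
      ([(i, 0, 0)], PySem.Dict.ofList D2, 0) with
  | some r => r
  | none => 0

-- ===== PRECONDITION & SPEC =====
/-- children of `k`, stopping at memoized keys (the edges A actually follows). -/
def pvSuccs (dD : PySem.Dict Int (List Int)) (m0 : PySem.Dict Int Int) (k : Int) : List Int :=
  if m0.contains k then [] else (dD.get? k).getD []

def pvStep (dD : PySem.Dict Int (List Int)) (m0 : PySem.Dict Int Int) (s : Finset Int) : Finset Int :=
  s ∪ s.biUnion (fun x => (pvSuccs dD m0 x).toFinset)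

/-- all nodes reachable from `k` in ≥ 1 edge (saturated after `pvLB D` closure steps). -/
def pvDesc (dD : PySem.Dict Int (List Int)) (m0 : PySem.Dict Int Int) (N : Nat) (k : Int) : Finset Int :=
  (pvStep dD m0)^[N] (pvSuccs dD m0 k).toFinset

/-- what Pre_ demands at each reachable node. -/
def pvNodeOk (dD : PySem.Dict Int (List Int)) (m0 : PySem.Dict Int Int) (N : Nat) (k : Int) : Prop :=
  m0.contains k = false → ((dD.get? k).isSome = true ∧ k ∉ pvDesc dD m0 N k)

-- Pre_ excludes exactly the inputs on which A raises (KeyError on a reachable missing key,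
-- or infinite recursion / RecursionError on a cycle reachable through non-memoized nodes):
-- every non-memoized node reachable from i must be a key of D and must not reach itself.
def Pre_subordinates (D : List (Int × List Int)) (D2 : List (Int × Int)) (i : Int) : Prop :=
  pvNodeOk (PySem.Dict.ofList D) (PySem.Dict.ofList D2) (pvLB D) i ∧
  ∀ k ∈ pvDesc (PySem.Dict.ofList D) (PySem.Dict.ofList D2) (pvLB D) i,
    pvNodeOk (PySem.Dict.ofList D) (PySem.Dict.ofList D2) (pvLB D) k

instance (D : List (Int × List Int)) (D2 : List (Int × Int)) (i : Int) :
    Decidable (Pre_subordinates D D2 i) := by unfold Pre_subordinates pvNodeOk; infer_instance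

def pvWitness_subordinates : (List (Int × List Int)) × (List (Int × Int)) × Int :=
  ([(0, [1, 2]), (1, []), (2, [1])], [(1, 5)], 0)

def Spec_subordinates (D : List (Int × List Int)) (D2 : List (Int × Int)) (i : Int) (out : Int) : Prop := out = subordinates_alt D D2 i
instance (D : List (Int × List Int)) (D2 : List (Int × Int)) (i : Int) (out : Int) : Decidable (Spec_subordinates D D2 i out) := by unfold Spec_subordinates; infer_instance

-- ===== CLAIM (what is proved, stated in full; the proofs are below) =====
def Claim_equal_subordinates : Prop := ∀ (D : List (Int × List Int)) (D2 : List (Int × Int)) (i : Int), Dom_subordinates D D2 i → Pre_subordinates D D2 i → Spec_subordinates D D2 i (subordinates D D2 i)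

-- ===== LEMMAS AND PROOFS =====

-- ---------- closure / rank machinery ----------

/-- `k` is reachable from `i` (in 0 or more edges). -/
def pvReachP (dD : PySem.Dict Int (List Int)) (m0 : PySem.Dict Int Int) (N : Nat) (i k : Int) : Prop :=
  k = i ∨ k ∈ pvDesc dD m0 N i


theorem pvStep_infl (dD : PySem.Dict Int (List Int)) (m0 : PySem.Dict Int Int) (s : Finset Int) :
    s ⊆ pvStep dD m0 s := Finset.subset_union_left

theorem pvStep_mono (dD : PySem.Dict Int (List Int)) (m0 : PySem.Dict Int Int) {s t : Finset Int}
    (h : s ⊆ t) : pvStep dD m0 s ⊆ pvStep dD m0 t :=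
  Finset.union_subset_union h (Finset.biUnion_subset_biUnion_of_subset_left _ h)

theorem pvIter_infl (dD : PySem.Dict Int (List Int)) (m0 : PySem.Dict Int Int) (m : Nat) (s : Finset Int) :
    s ⊆ (pvStep dD m0)^[m] s := by
  induction m with
  | zero => simp
  | succ m ih =>
    rw [Function.iterate_succ_apply']
    exact ih.trans (pvStep_infl dD m0 _) |>.trans (by rfl)

def pvU (dD : PySem.Dict Int (List Int)) : Finset Int :=
  ((dD.items).flatMap (fun p => p.2)).toFinset

theorem pvSuccs_sub_U (dD : PySem.Dict Int (List Int)) (m0 : PySem.Dict Int Int) (x : Int) :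
    (pvSuccs dD m0 x).toFinset ⊆ pvU dD := by
  intro j hj
  simp only [List.mem_toFinset] at hj
  unfold pvSuccs at hj
  split at hj
  · simp at hj
  · cases hget : dD.get? x with
    | none => rw [hget] at hj; simp at hj
    | some cs =>
      rw [hget] at hj; simp only [Option.getD_some] at hj
      have hmem := PySem.Dict.mem_items_of_get?_eq_some dD hget
      unfold pvU
      simp only [List.mem_toFinset, List.mem_flatMap]
      exact ⟨(x, cs), hmem, hj⟩

theorem pvStep_sub_U (dD : PySem.Dict Int (List Int)) (m0 : PySem.Dict Int Int) {s : Finset Int}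
    (h : s ⊆ pvU dD) : pvStep dD m0 s ⊆ pvU dD := by
  unfold pvStep
  refine Finset.union_subset h ?_
  refine Finset.biUnion_subset.2 ?_
  intro x _
  exact pvSuccs_sub_U dD m0 x

theorem pvIter_sub_U (dD : PySem.Dict Int (List Int)) (m0 : PySem.Dict Int Int) (m : Nat) {s : Finset Int}
    (h : s ⊆ pvU dD) : (pvStep dD m0)^[m] s ⊆ pvU dD := by
  induction m with
  | zero => simpa
  | succ m ih => rw [Function.iterate_succ_apply']; exact pvStep_sub_U dD m0 ih

theorem pvStable_ge (dD : PySem.Dict Int (List Int)) (m0 : PySem.Dict Int Int) (s : Finset Int) (m : Nat)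
    (h : (pvStep dD m0)^[m] s = (pvStep dD m0)^[m+1] s) :
    ∀ p, m ≤ p → (pvStep dD m0)^[p] s = (pvStep dD m0)^[p+1] s := by
  intro p hp
  induction p, hp using Nat.le_induction with
  | base => exact h
  | succ p _ ih =>
    rw [Function.iterate_succ_apply', Function.iterate_succ_apply' (n := p + 1)]
    exact congrArg _ ih

theorem pvGrowth (dD : PySem.Dict Int (List Int)) (m0 : PySem.Dict Int Int) (s : Finset Int) :
    ∀ m, (∀ p < m, (pvStep dD m0)^[p] s ≠ (pvStep dD m0)^[p+1] s) → m ≤ ((pvStep dD m0)^[m] s).card := by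
  intro m
  induction m with
  | zero => intro _; exact Nat.zero_le _
  | succ m ih =>
    intro h
    have hm := ih (fun p hp => h p (Nat.lt_succ_of_lt hp))
    have hsub : (pvStep dD m0)^[m] s ⊆ (pvStep dD m0)^[m+1] s := by
      rw [Function.iterate_succ_apply']
      exact pvStep_infl dD m0 _
    have hss : (pvStep dD m0)^[m] s ⊂ (pvStep dD m0)^[m+1] s :=
      lt_of_le_of_ne hsub (h m (Nat.lt_succ_self m))
    have := Finset.card_lt_card hss
    omega

theorem pvSaturated (dD : PySem.Dict Int (List Int)) (m0 : PySem.Dict Int Int) (N : Nat) {s : Finset Int}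
    (hs : s ⊆ pvU dD) (hN : (pvU dD).card ≤ N) :
    pvStep dD m0 ((pvStep dD m0)^[N] s) = (pvStep dD m0)^[N] s := by
  by_cases hall : ∀ p < N + 1, (pvStep dD m0)^[p] s ≠ (pvStep dD m0)^[p+1] s
  · exfalso
    have h1 := pvGrowth dD m0 s (N + 1) hall
    have h2 : ((pvStep dD m0)^[N+1] s).card ≤ (pvU dD).card :=
      Finset.card_le_card (pvIter_sub_U dD m0 _ hs)
    omega
  · push Not at hall
    obtain ⟨p, hp, heq⟩ := hall
    have := pvStable_ge dD m0 s p heq N (by omega)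
    rw [Function.iterate_succ_apply'] at this
    exact this.symm

theorem pvDesc_sub_U (dD : PySem.Dict Int (List Int)) (m0 : PySem.Dict Int Int) (N : Nat) (k : Int) :
    pvDesc dD m0 N k ⊆ pvU dD :=
  pvIter_sub_U dD m0 N (pvSuccs_sub_U dD m0 k)

theorem pvMem_desc_of_succs (dD : PySem.Dict Int (List Int)) (m0 : PySem.Dict Int Int) (N : Nat)
    {j k : Int} (hj : j ∈ pvSuccs dD m0 k) : j ∈ pvDesc dD m0 N k :=
  pvIter_infl dD m0 N _ (List.mem_toFinset.2 hj)

theorem pvDesc_closed (dD : PySem.Dict Int (List Int)) (m0 : PySem.Dict Int Int) (N : Nat) (k : Int)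
    (hN : (pvU dD).card ≤ N) {x j : Int} (hx : x ∈ pvDesc dD m0 N k) (hj : j ∈ pvSuccs dD m0 x) :
    j ∈ pvDesc dD m0 N k := by
  have hsU : (pvSuccs dD m0 k).toFinset ⊆ pvU dD := pvSuccs_sub_U dD m0 k
  have hsat := pvSaturated dD m0 N hsU hN
  show j ∈ (pvStep dD m0)^[N] (pvSuccs dD m0 k).toFinset
  rw [← hsat]
  unfold pvStep
  refine Finset.mem_union.2 (Or.inr ?_)
  exact Finset.mem_biUnion.2 ⟨x, hx, List.mem_toFinset.2 hj⟩

theorem pvDesc_sub_of_succs (dD : PySem.Dict Int (List Int)) (m0 : PySem.Dict Int Int) (N : Nat)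
    {j k : Int} (hN : (pvU dD).card ≤ N) (hj : j ∈ pvSuccs dD m0 k) :
    pvDesc dD m0 N j ⊆ pvDesc dD m0 N k := by
  have hjk : j ∈ pvDesc dD m0 N k := pvMem_desc_of_succs dD m0 N hj
  have hsat := pvSaturated dD m0 N (pvSuccs_sub_U dD m0 k) hN
  have aux : ∀ m, (pvStep dD m0)^[m] (pvSuccs dD m0 j).toFinset ⊆ pvDesc dD m0 N k := by
    intro m
    induction m with
    | zero =>
      simp only [Function.iterate_zero, id]
      intro x hx
      exact pvDesc_closed dD m0 N k hN hjk (List.mem_toFinset.1 hx)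
    | succ m ih =>
      rw [Function.iterate_succ_apply']
      calc pvStep dD m0 ((pvStep dD m0)^[m] (pvSuccs dD m0 j).toFinset)
          ⊆ pvStep dD m0 (pvDesc dD m0 N k) := pvStep_mono dD m0 ih
        _ = pvDesc dD m0 N k := hsat
  exact aux N

def pvRank (dD : PySem.Dict Int (List Int)) (m0 : PySem.Dict Int Int) (N : Nat) (k : Int) : Nat :=
  (pvDesc dD m0 N k).card

theorem pvRank_lt (dD : PySem.Dict Int (List Int)) (m0 : PySem.Dict Int Int) (N : Nat)
    {j k : Int} (hN : (pvU dD).card ≤ N) (hj : j ∈ pvSuccs dD m0 k) (hjj : j ∉ pvDesc dD m0 N j) :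
    pvRank dD m0 N j < pvRank dD m0 N k := by
  refine Finset.card_lt_card ?_
  refine ⟨pvDesc_sub_of_succs dD m0 N hN hj, fun hsub => ?_⟩
  exact hjj (hsub (pvMem_desc_of_succs dD m0 N hj))

-- ---------- under Pre_, A's run succeeds ----------

theorem pvLoopTerm (dD : PySem.Dict Int (List Int)) (m0 : PySem.Dict Int Int) (N : Nat) (i0 : Int)
    (f : Nat) (hf : 1 ≤ f)
    (REC : ∀ k d2, pvReachP dD m0 N i0 k → (∀ x, m0.contains x = true → d2.contains x = true) →
      pvRank dD m0 N k < f → ∃ v d2', pvARun dD f d2 k = some (v, d2') ∧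
        (∀ x, d2.contains x = true → d2'.contains x = true)) :
    ∀ cs t d2, (∀ j ∈ cs, pvReachP dD m0 N i0 j ∧ (m0.contains j = false → pvRank dD m0 N j < f)) →
      (∀ x, m0.contains x = true → d2.contains x = true) →
      ∃ t' d2', pvALoop dD f cs t d2 = some (t', d2') ∧
        (∀ x, d2.contains x = true → d2'.contains x = true) := by
  intro cs
  induction cs with
  | nil => intro t d2 _ _; exact ⟨t, d2, by rw [pvALoop], fun x hx => hx⟩
  | cons j rest ih =>
    intro t d2 hjs h1
    have hchild : ∃ v d2', pvARun dD f d2 j = some (v, d2') ∧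
        (∀ x, d2.contains x = true → d2'.contains x = true) := by
      by_cases hc : d2.contains j = true
      · obtain ⟨f', rfl⟩ : ∃ f', f = f' + 1 := ⟨f - 1, by omega⟩
        exact ⟨d2.getD j 0, d2, by rw [pvARun]; simp [hc], fun x hx => hx⟩
      · have hm0 : m0.contains j = false := by
          cases hm : m0.contains j
          · rfl
          · exact absurd (h1 j hm) hc
        exact REC j d2 (hjs j (List.mem_cons_self)).1 h1 ((hjs j (List.mem_cons_self)).2 hm0)
    obtain ⟨v, d2c, hr, hmono⟩ := hchild
    obtain ⟨t', d2', hloop, hmono'⟩ := ih (t + 1 + v) d2c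
      (fun x hx => hjs x (List.mem_cons_of_mem _ hx))
      (fun x hx => hmono x (h1 x hx))
    exact ⟨t', d2', by rw [pvALoop]; rw [hr]; exact hloop, fun x hx => hmono' x (hmono x hx)⟩

theorem pvTerm (dD : PySem.Dict Int (List Int)) (m0 : PySem.Dict Int Int) (N : Nat) (i0 : Int)
    (hN : (pvU dD).card ≤ N)
    (hPre : ∀ k, pvReachP dD m0 N i0 k → pvNodeOk dD m0 N k) :
    ∀ f k d2, pvReachP dD m0 N i0 k → (∀ x, m0.contains x = true → d2.contains x = true) →
      pvRank dD m0 N k < f → ∃ v d2', pvARun dD f d2 k = some (v, d2') ∧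
        (∀ x, d2.contains x = true → d2'.contains x = true) := by
  intro f
  induction f with
  | zero => intro k d2 _ _ h; omega
  | succ f ihf =>
    intro k d2 hk h1 hrank
    by_cases hc : d2.contains k = true
    · exact ⟨d2.getD k 0, d2, by rw [pvARun]; simp [hc], fun x hx => hx⟩
    · have hm0 : m0.contains k = false := by
        cases hm : m0.contains k
        · rfl
        · exact absurd (h1 k hm) hc
      obtain ⟨hsome, hnd⟩ := hPre k hk hm0
      obtain ⟨cs, hcs⟩ := Option.isSome_iff_exists.1 hsome
      have hcb : d2.contains k = false := by cases hd : d2.contains k; rfl; exact absurd hd hc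
      by_cases hlen : cs.length = 0
      · refine ⟨0, d2.insert k 0, ?_, ?_⟩
        · rw [pvARun]; simp [hcb, hcs, hlen]
        · intro x hx; rw [PySem.Dict.contains_insert, hx, Bool.or_true]
      · -- the children of k
        have hsk : pvSuccs dD m0 k = cs := by simp [pvSuccs, hm0, hcs]
        have hjs : ∀ j ∈ cs, pvReachP dD m0 N i0 j ∧ (m0.contains j = false → pvRank dD m0 N j < f) := by
          intro j hj
          have hjsucc : j ∈ pvSuccs dD m0 k := by rw [hsk]; exact hj
          have hreach : pvReachP dD m0 N i0 j := by
            rcases hk with rfl | hkd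
            · exact Or.inr (pvMem_desc_of_succs dD m0 N hjsucc)
            · exact Or.inr (pvDesc_closed dD m0 N i0 hN hkd hjsucc)
          refine ⟨hreach, fun hm0j => ?_⟩
          obtain ⟨_, hndj⟩ := hPre j hreach hm0j
          have := pvRank_lt dD m0 N hN hjsucc hndj
          omega
        have hf1 : 1 ≤ f := by
          obtain ⟨j, hj⟩ := List.exists_mem_of_ne_nil cs (by intro h; rw [h] at hlen; simp at hlen)
          have : j ∈ pvDesc dD m0 N k := pvMem_desc_of_succs dD m0 N (hsk ▸ hj)
          have : 0 < pvRank dD m0 N k := Finset.card_pos.2 ⟨j, this⟩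
          omega
        obtain ⟨t', d2', hloop, hmono⟩ := pvLoopTerm dD m0 N i0 f hf1 ihf cs 0 d2 hjs h1
        refine ⟨t', d2'.insert k t', ?_, ?_⟩
        · rw [pvARun]; simp [hcb, hcs, hlen, hloop]
        · intro x hx; rw [PySem.Dict.contains_insert, hmono x hx, Bool.or_true]

-- ---------- machine: more fuel never changes a successful run ----------

theorem pvMRun_mono (dD : PySem.Dict Int (List Int)) :
    ∀ g st r, pvMRun dD g st = some r → pvMRun dD (g+1) st = some r := by
  intro g
  induction g with
  | zero => intro st r h; simp [pvMRun] at h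
  | succ g ih =>
    intro st r h
    obtain ⟨stk, memo, res⟩ := st
    cases stk with
    | nil => rw [pvMRun] at h ⊢; exact h
    | cons fr S =>
      obtain ⟨n, k, t⟩ := fr
      rw [pvMRun] at h ⊢
      by_cases hcond : (k = 0 ∧ memo.contains n = true)
      · rw [if_pos hcond] at h ⊢; exact ih _ _ h
      · rw [if_neg hcond] at h ⊢
        cases hget : dD.get? n with
        | none => rw [hget] at h; simp at h
        | some cs =>
          rw [hget] at h
          simp only at h ⊢
          by_cases hlt : k < (cs.length : Int)
          · rw [if_pos hlt] at h ⊢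
            cases hpg : PySem.List.pyGet? cs k with
            | none => rw [hpg] at h; simp at h
            | some c => rw [hpg] at h; simp only at h ⊢; exact ih _ _ h
          · rw [if_neg hlt] at h ⊢; exact ih _ _ h

theorem pvMRun_mono_le (dD : PySem.Dict Int (List Int)) {g g' : Nat} (hle : g ≤ g') :
    ∀ st r, pvMRun dD g st = some r → pvMRun dD g' st = some r := by
  induction g', hle using Nat.le_induction with
  | base => exact fun st r h => h
  | succ g' _ ih => exact fun st r h => pvMRun_mono dD g' st r (ih st r h)

-- ---------- the machine simulates A's recursion step for step ----------

theorem pvSimLoop (dD : PySem.Dict Int (List Int)) (Bse : Nat) (f : Nat)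
    (HR : ∀ d2 n v d2', pvARun dD f d2 n = some (v, d2') →
      ∀ S res g r, pvMRun dD g (pvDeliver v S d2' res) = some r →
        pvMRun dD (Bse ^ f + g) ((n, 0, 0) :: S, d2, res) = some r) :
    ∀ (rest : List Int) (kn : Nat) (t : Int) d2 t' d2'' (n : Int) (cs0 : List Int),
      dD.get? n = some cs0 → cs0.drop kn = rest →
      (kn = 0 → d2.contains n = false) →
      pvALoop dD f rest t d2 = some (t', d2'') →
      ∀ S res g r, pvMRun dD g (pvDeliver t' S (d2''.insert n t') res) = some r →
        pvMRun dD (rest.length * (Bse ^ f + 1) + 1 + g) (((n, (kn : Int), t)) :: S, d2, res) = some r := by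
  intro rest
  induction rest with
  | nil =>
    intro kn t d2 t' d2'' n cs0 hget hdrop hk0 hloop S res g r hdel
    have hlen : cs0.length ≤ kn := List.drop_eq_nil_iff.1 hdrop
    rw [pvALoop] at hloop
    simp only [Option.some.injEq, Prod.mk.injEq] at hloop
    obtain ⟨rfl, rfl⟩ := hloop
    have hfuel : ([] : List Int).length * (Bse ^ f + 1) + 1 + g = g + 1 := by simp only [List.length_nil]; omega
    rw [hfuel, pvMRun]
    have hcond : ¬((kn : Int) = 0 ∧ d2.contains n = true) := by
      rintro ⟨h0, hcn⟩
      have : kn = 0 := by exact_mod_cast h0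
      rw [hk0 this] at hcn; exact Bool.false_ne_true hcn
    rw [if_neg hcond, hget]
    simp only
    have hnotlt : ¬((kn : Int) < (cs0.length : Int)) := by exact_mod_cast not_lt.2 (Int.ofNat_le.2 hlen)
    rw [if_neg hnotlt]
    exact hdel
  | cons c rest' ih =>
    intro kn t d2 t' d2'' n cs0 hget hdrop hk0 hloop S res g r hdel
    have hkn_lt : kn < cs0.length := by
      by_contra hge
      rw [List.drop_eq_nil_iff.2 (by omega)] at hdrop
      simp at hdrop
    have hgetk : cs0[kn]? = some c := by
      have h0 : (cs0.drop kn)[0]? = some c := by rw [hdrop]; rfl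
      rwa [List.getElem?_drop, Nat.add_zero] at h0
    have hdrop' : cs0.drop (kn + 1) = rest' := by
      have : cs0.drop (kn + 1) = (cs0.drop kn).drop 1 := by rw [List.drop_drop, Nat.add_comm]
      rw [this, hdrop]; rfl
    rw [pvALoop] at hloop
    cases hrun : pvARun dD f d2 c with
    | none => rw [hrun] at hloop; simp at hloop
    | some p =>
      obtain ⟨vc, d2c⟩ := p
      rw [hrun] at hloop
      simp only at hloop
      have hfuel : (c :: rest').length * (Bse ^ f + 1) + 1 + g
          = (Bse ^ f + (rest'.length * (Bse ^ f + 1) + 1 + g)) + 1 := by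
        simp [List.length_cons]; ring
      rw [hfuel, pvMRun]
      have hcond : ¬((kn : Int) = 0 ∧ d2.contains n = true) := by
        rintro ⟨h0, hcn⟩
        have : kn = 0 := by exact_mod_cast h0
        rw [hk0 this] at hcn; exact Bool.false_ne_true hcn
      rw [if_neg hcond, hget]
      simp only
      have hlt : (kn : Int) < (cs0.length : Int) := Int.ofNat_lt.2 hkn_lt
      rw [if_pos hlt]
      have hpg : PySem.List.pyGet? cs0 (kn : Int) = some c := by
        rw [PySem.List.pyGet?_natCast]; exact hgetk
      rw [hpg]
      refine HR d2 c vc d2c hrun ((n, (kn : Int) + 1, t) :: S) res _ r ?_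
      have hdeliver : pvDeliver vc ((n, (kn : Int) + 1, t) :: S) d2c res
          = ((n, (kn : Int) + 1, t + 1 + vc) :: S, d2c, res) := rfl
      rw [hdeliver]
      have hcast : ((kn : Int) + 1) = ((kn + 1 : Nat) : Int) := by push_cast; ring
      rw [hcast]
      exact ih (kn + 1) (t + 1 + vc) d2c t' d2'' n cs0 hget hdrop' (by omega) hloop S res g r hdel

theorem pvSimRun (dD : PySem.Dict Int (List Int)) (Bse : Nat) (hB2 : 2 ≤ Bse)
    (hB : ∀ n cs, dD.get? n = some cs → cs.length + 2 ≤ Bse) :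
    ∀ (f : Nat) d2 (n v : Int) d2', pvARun dD f d2 n = some (v, d2') →
      ∀ S res g r, pvMRun dD g (pvDeliver v S d2' res) = some r →
        pvMRun dD (Bse ^ f + g) ((n, 0, 0) :: S, d2, res) = some r := by
  intro f
  induction f with
  | zero => intro d2 n v d2' h; simp [pvARun] at h
  | succ f ihf =>
    intro d2 n v d2' h S res g r hdel
    obtain ⟨m, hm⟩ : ∃ m, Bse ^ (f + 1) = m + 1 :=
      ⟨Bse ^ (f + 1) - 1, by have := pow_pos (show 0 < Bse by omega) (f + 1); omega⟩
    rw [pvARun] at h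
    by_cases hc : d2.contains n = true
    · rw [if_pos hc] at h
      simp only [Option.some.injEq, Prod.mk.injEq] at h
      obtain ⟨rfl, rfl⟩ := h
      rw [hm, (by omega : m + 1 + g = (m + g) + 1), pvMRun]
      rw [if_pos ⟨rfl, hc⟩]
      exact pvMRun_mono_le dD (by omega : g ≤ m + g) _ r hdel
    · rw [if_neg hc] at h
      have hcb : d2.contains n = false := by cases hd : d2.contains n; rfl; exact absurd hd hc
      cases hget : dD.get? n with
      | none => rw [hget] at h; simp at h
      | some cs =>
        rw [hget] at h
        simp only at h
        by_cases hlen : cs.length = 0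
        · rw [if_pos hlen] at h
          simp only [Option.some.injEq, Prod.mk.injEq] at h
          obtain ⟨rfl, rfl⟩ := h
          rw [hm, (by omega : m + 1 + g = (m + g) + 1), pvMRun]
          rw [if_neg (by simp [hcb])]
          rw [hget]
          simp only
          rw [if_neg (by rw [hlen]; simp)]
          exact pvMRun_mono_le dD (by omega : g ≤ m + g) _ r hdel
        · rw [if_neg hlen] at h
          cases hloop : pvALoop dD f cs 0 d2 with
          | none => rw [hloop] at h; simp at h
          | some p =>
            obtain ⟨t, d2L⟩ := p
            rw [hloop] at h
            simp only [Option.some.injEq, Prod.mk.injEq] at h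
            obtain ⟨rfl, rfl⟩ := h
            have hf1 : 1 ≤ f := by
              cases f with
              | zero =>
                exfalso
                obtain ⟨c, rest, rfl⟩ : ∃ c rest, cs = c :: rest := by
                  cases cs with
                  | nil => simp at hlen
                  | cons c rest => exact ⟨c, rest, rfl⟩
                rw [pvALoop] at hloop
                simp [pvARun] at hloop
              | succ f => omega
            have hsim := pvSimLoop dD Bse f (ihf) cs 0 0 d2 t d2L n cs hget
              (by simp) (fun _ => hcb) hloop S res g r hdel
            have hsim' : pvMRun dD (cs.length * (Bse ^ f + 1) + 1 + g) ((n, 0, 0) :: S, d2, res) = some r := by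
              simpa using hsim
            have harith : cs.length * (Bse ^ f + 1) + 1 + g ≤ Bse ^ (f + 1) + g := by
                have hlB : cs.length + 2 ≤ Bse := hB n cs hget
                have hBf : Bse ≤ Bse ^ f :=
                  le_of_eq_of_le (pow_one Bse).symm (Nat.pow_le_pow_right (by omega) hf1)
                have h1 : cs.length + 1 ≤ Bse ^ f := by omega
                have h2 : cs.length * Bse ^ f + (cs.length + 1)
                    ≤ cs.length * Bse ^ f + Bse ^ f := by omega
                have h3 : cs.length * Bse ^ f + Bse ^ f = (cs.length + 1) * Bse ^ f := by ring
                have h4 : (cs.length + 1) * Bse ^ f ≤ Bse * Bse ^ f :=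
                  Nat.mul_le_mul_right _ (by omega)
                have h5 : Bse * Bse ^ f = Bse ^ (f + 1) := by ring
                calc cs.length * (Bse ^ f + 1) + 1 + g
                    = cs.length * Bse ^ f + (cs.length + 1) + g := by ring
                  _ ≤ Bse ^ (f + 1) + g := by omega
            exact pvMRun_mono_le dD harith _ r hsim'
theorem pvLen_le (l : List (Int × List Int)) : ∀ p ∈ l, p.2.length ≤ (l.flatMap (fun q => q.2)).length := by
  intro p hp
  induction l with
  | nil => simp at hp
  | cons q rest ih =>
    rw [List.flatMap_cons, List.length_append]
    cases List.mem_cons.1 hp with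
    | inl he => rw [he]; omega
    | inr hp' => have := ih hp'; omega

-- ===== VERDICT (by name: the statement is the Claim_ definition above) =====
theorem subordinates_spec : Claim_equal_subordinates := by
  intro D D2 i _ hPre
  unfold Spec_subordinates
  have hN : (pvU (PySem.Dict.ofList D)).card ≤ pvLB D := by
    unfold pvU pvLB
    exact List.toFinset_card_le _
  have hPre' : ∀ k, pvReachP (PySem.Dict.ofList D) (PySem.Dict.ofList D2) (pvLB D) i k →
      pvNodeOk (PySem.Dict.ofList D) (PySem.Dict.ofList D2) (pvLB D) k := by
    rintro k (rfl | hk)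
    · exact hPre.1
    · exact hPre.2 k hk
  have hrank : pvRank (PySem.Dict.ofList D) (PySem.Dict.ofList D2) (pvLB D) i < pvFuelA D := by
    unfold pvRank pvFuelA
    have := Finset.card_le_card (pvDesc_sub_U (PySem.Dict.ofList D) (PySem.Dict.ofList D2) (pvLB D) i)
    omega
  obtain ⟨v, d2', hrunA, -⟩ := pvTerm (PySem.Dict.ofList D) (PySem.Dict.ofList D2) (pvLB D) i hN hPre'
    (pvFuelA D) i (PySem.Dict.ofList D2) (Or.inl rfl) (fun x hx => hx) hrank
  have hA : subordinates D D2 i = v := by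
    unfold subordinates
    rw [hrunA]
  have hB : ∀ n cs, (PySem.Dict.ofList D).get? n = some cs → cs.length + 2 ≤ pvFuelA D := by
    intro n cs hget
    have hmem := PySem.Dict.mem_items_of_get?_eq_some (PySem.Dict.ofList D) hget
    have hlen := pvLen_le ((PySem.Dict.ofList D).items) (n, cs) hmem
    simp only at hlen
    unfold pvFuelA pvLB
    omega
  have hB2 : 2 ≤ pvFuelA D := by unfold pvFuelA; omega
  have hdel1 : pvMRun (PySem.Dict.ofList D) 1 (pvDeliver v [] d2' 0) = some v := by
    show pvMRun (PySem.Dict.ofList D) (0 + 1) ([], d2', v) = some v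
    rw [pvMRun]
  have hsim := pvSimRun (PySem.Dict.ofList D) (pvFuelA D) hB2 hB (pvFuelA D)
    (PySem.Dict.ofList D2) i v d2' hrunA [] 0 1 v hdel1
  have hBrun : subordinates_alt D D2 i = v := by
    unfold subordinates_alt pvFuelB
    rw [hsim]
  rw [hA, hBrun]
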